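-- pv_equiv track=rewrite | github.com/jiheneguesmi/Business-Value-Knowledge-Graph | main/Extraction_et_Embedding/classification_test/multi_llm_phrase.py | determine_label
-- ===== SOURCE A (Python) =====
-- PRIORITY_ORDER = ["ROI", "Obligation", "Notoriété", "Description"]
--
-- MIN_SCORE      = 1
--
-- def determine_label(roi: int, not_: int, obl: int) -> str:
--     if roi < MIN_SCORE and not_ < MIN_SCORE and obl < MIN_SCORE:
--         return "Description"
--     scores = {"ROI": roi, "Obligation": obl, "Notoriété": not_}
--     max_score = max(scores.values())
--     tied = [c for c, s in scores.items() if s == max_score]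
--     for priority in PRIORITY_ORDER:
--         if priority in tied:
--             return priority
--     return tied[0]
-- ===== SOURCE B (Python) =====
-- MIN_SCORE = 1
--
-- def determine_label(roi: int, not_: int, obl: int) -> str:
--     if roi < MIN_SCORE and not_ < MIN_SCORE and obl < MIN_SCORE:
--         return "Description"
--     best_label, best_score = "ROI", roi
--     for label, score in (("Obligation", obl), ("Notoriété", not_)):
--         if score > best_score:
--             best_label, best_score = label, score
--     return best_label
-- ===== Notes on version B (the rewrite author's own statement) =====
-- stated objective: simpler
-- what changed: Replaced the dict, max() call, tied-candidates list comprehension and PRIORITY_ORDER scan with a single strict-> argmax pass over the three candidates listed in priority order, so the highest-priority candidate wins ties by construction.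
import Mathlib
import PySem

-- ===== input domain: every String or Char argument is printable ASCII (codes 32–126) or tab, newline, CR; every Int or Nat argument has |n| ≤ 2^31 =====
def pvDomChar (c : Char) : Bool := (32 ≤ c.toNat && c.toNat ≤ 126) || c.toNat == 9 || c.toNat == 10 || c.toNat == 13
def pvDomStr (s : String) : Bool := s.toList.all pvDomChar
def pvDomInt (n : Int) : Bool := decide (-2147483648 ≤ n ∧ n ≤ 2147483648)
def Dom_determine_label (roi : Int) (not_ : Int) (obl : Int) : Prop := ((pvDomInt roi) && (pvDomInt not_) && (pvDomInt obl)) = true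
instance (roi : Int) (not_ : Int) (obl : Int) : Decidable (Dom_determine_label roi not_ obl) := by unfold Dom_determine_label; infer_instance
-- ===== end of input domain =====

-- B replaces A's dict/max/tied-list/priority-scan with one strict-> argmax pass over the
-- priority-ordered candidates (objective: simpler).


-- ===== PORT A =====
-- the 'for priority in PRIORITY_ORDER: if priority in tied: return priority' loop
def pvPriorityScan : List String → List String → Option String
  | [], _ => none
  | p :: rest, tied => if p ∈ tied then some p else pvPriorityScan rest tied

def determine_label (roi : Int) (not_ : Int) (obl : Int) : String :=
  if roi < 1 ∧ not_ < 1 ∧ obl < 1 then "Description"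
  else
    -- scores = {"ROI": roi, "Obligation": obl, "Notoriété": not_}
    let scores : List (String × Int) := [("ROI", roi), ("Obligation", obl), ("Notoriété", not_)]
    match PySem.List.max? (scores.map (·.2)) (fun x => x) with
    | none => ""  -- unreachable: scores is a nonempty literal, so max never raises
    | some max_score =>
      let tied := (scores.filter (fun cs => cs.2 == max_score)).map (·.1)
      match pvPriorityScan ["ROI", "Obligation", "Notoriété", "Description"] tied with
      | some p => p
      | none => (PySem.List.pyGet? tied 0).getD ""  -- unreachable: tied ⊆ PRIORITY_ORDER and nonempty

-- ===== PORT B =====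
def determine_label_alt (roi : Int) (not_ : Int) (obl : Int) : String :=
  if roi < 1 ∧ not_ < 1 ∧ obl < 1 then "Description"
  else
    (List.foldl (fun (best : String × Int) (c : String × Int) => if c.2 > best.2 then c else best)
      ("ROI", roi) [("Obligation", obl), ("Notoriété", not_)]).1

-- ===== PRECONDITION & SPEC =====
def Spec_determine_label (roi : Int) (not_ : Int) (obl : Int) (out : String) : Prop := out = determine_label_alt roi not_ obl
instance (roi : Int) (not_ : Int) (obl : Int) (out : String) : Decidable (Spec_determine_label roi not_ obl out) := by unfold Spec_determine_label; infer_instance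

-- ===== CLAIM (what is proved, stated in full; the proofs are below) =====
def Claim_equal_determine_label : Prop := ∀ (roi : Int) (not_ : Int) (obl : Int), Dom_determine_label roi not_ obl → Spec_determine_label roi not_ obl (determine_label roi not_ obl)

-- ===== LEMMAS AND PROOFS =====

-- ===== VERDICT (by name: the statement is the Claim_ definition above) =====
set_option maxHeartbeats 1000000 in
theorem determine_label_spec : Claim_equal_determine_label := by
  intro roi not_ obl _
  unfold Spec_determine_label determine_label determine_label_alt
  split_ifs with h
  · rfl
  · simp only [PySem.List.max?_id_cons, List.foldl, List.map]
    rcases lt_trichotomy roi obl with h1 | h1 | h1 <;>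
      rcases lt_trichotomy roi not_ with h2 | h2 | h2 <;>
      rcases lt_trichotomy obl not_ with h3 | h3 | h3
    · have hM : max (max roi obl) not_ = not_ := by omega
      rw [hM]
      have e1 : (roi == not_) = false := by simp only [beq_eq_false_iff_ne, ne_eq]; try omega
      have e2 : (obl == not_) = false := by simp only [beq_eq_false_iff_ne, ne_eq]; try omega
      have e3 : (not_ == not_) = true := by simp only [beq_iff_eq]; try omega
      simp only [List.filter, e1, e2, e3, List.map]
      simp [pvPriorityScan]
      try split_ifs <;> simp_all <;> omega
    · have hM : max (max roi obl) not_ = obl := by omega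
      rw [hM]
      have e1 : (roi == obl) = false := by simp only [beq_eq_false_iff_ne, ne_eq]; try omega
      have e2 : (obl == obl) = true := by simp only [beq_iff_eq]; try omega
      have e3 : (not_ == obl) = true := by simp only [beq_iff_eq]; try omega
      simp only [List.filter, e1, e2, e3, List.map]
      simp [pvPriorityScan]
      try split_ifs <;> simp_all <;> omega
    · have hM : max (max roi obl) not_ = obl := by omega
      rw [hM]
      have e1 : (roi == obl) = false := by simp only [beq_eq_false_iff_ne, ne_eq]; try omega
      have e2 : (obl == obl) = true := by simp only [beq_iff_eq]; try omega
      have e3 : (not_ == obl) = false := by simp only [beq_eq_false_iff_ne, ne_eq]; try omega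
      simp only [List.filter, e1, e2, e3, List.map]
      simp [pvPriorityScan]
      try split_ifs <;> simp_all <;> omega
    · omega
    · omega
    · have hM : max (max roi obl) not_ = obl := by omega
      rw [hM]
      have e1 : (roi == obl) = false := by simp only [beq_eq_false_iff_ne, ne_eq]; try omega
      have e2 : (obl == obl) = true := by simp only [beq_iff_eq]; try omega
      have e3 : (not_ == obl) = false := by simp only [beq_eq_false_iff_ne, ne_eq]; try omega
      simp only [List.filter, e1, e2, e3, List.map]
      simp [pvPriorityScan]
      try split_ifs <;> simp_all <;> omega
    · omega
    · omega
    · have hM : max (max roi obl) not_ = obl := by omega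
      rw [hM]
      have e1 : (roi == obl) = false := by simp only [beq_eq_false_iff_ne, ne_eq]; try omega
      have e2 : (obl == obl) = true := by simp only [beq_iff_eq]; try omega
      have e3 : (not_ == obl) = false := by simp only [beq_eq_false_iff_ne, ne_eq]; try omega
      simp only [List.filter, e1, e2, e3, List.map]
      simp [pvPriorityScan]
      try split_ifs <;> simp_all <;> omega
    · have hM : max (max roi obl) not_ = not_ := by omega
      rw [hM]
      have e1 : (roi == not_) = false := by simp only [beq_eq_false_iff_ne, ne_eq]; try omega
      have e2 : (obl == not_) = false := by simp only [beq_eq_false_iff_ne, ne_eq]; try omega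
      have e3 : (not_ == not_) = true := by simp only [beq_iff_eq]; try omega
      simp only [List.filter, e1, e2, e3, List.map]
      simp [pvPriorityScan]
      try split_ifs <;> simp_all <;> omega
    · omega
    · omega
    · omega
    · have hM : max (max roi obl) not_ = roi := by omega
      rw [hM]
      have e1 : (roi == roi) = true := by simp only [beq_iff_eq]; try omega
      have e2 : (obl == roi) = true := by simp only [beq_iff_eq]; try omega
      have e3 : (not_ == roi) = true := by simp only [beq_iff_eq]; try omega
      simp only [List.filter, e1, e2, e3, List.map]
      simp [pvPriorityScan]
      try split_ifs <;> simp_all <;> omega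
    · omega
    · omega
    · omega
    · have hM : max (max roi obl) not_ = roi := by omega
      rw [hM]
      have e1 : (roi == roi) = true := by simp only [beq_iff_eq]; try omega
      have e2 : (obl == roi) = true := by simp only [beq_iff_eq]; try omega
      have e3 : (not_ == roi) = false := by simp only [beq_eq_false_iff_ne, ne_eq]; try omega
      simp only [List.filter, e1, e2, e3, List.map]
      simp [pvPriorityScan]
      try split_ifs <;> simp_all <;> omega
    · have hM : max (max roi obl) not_ = not_ := by omega
      rw [hM]
      have e1 : (roi == not_) = false := by simp only [beq_eq_false_iff_ne, ne_eq]; try omega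
      have e2 : (obl == not_) = false := by simp only [beq_eq_false_iff_ne, ne_eq]; try omega
      have e3 : (not_ == not_) = true := by simp only [beq_iff_eq]; try omega
      simp only [List.filter, e1, e2, e3, List.map]
      simp [pvPriorityScan]
      try split_ifs <;> simp_all <;> omega
    · omega
    · omega
    · have hM : max (max roi obl) not_ = roi := by omega
      rw [hM]
      have e1 : (roi == roi) = true := by simp only [beq_iff_eq]; try omega
      have e2 : (obl == roi) = false := by simp only [beq_eq_false_iff_ne, ne_eq]; try omega
      have e3 : (not_ == roi) = true := by simp only [beq_iff_eq]; try omega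
      simp only [List.filter, e1, e2, e3, List.map]
      simp [pvPriorityScan]
      try split_ifs <;> simp_all <;> omega
    · omega
    · omega
    · have hM : max (max roi obl) not_ = roi := by omega
      rw [hM]
      have e1 : (roi == roi) = true := by simp only [beq_iff_eq]; try omega
      have e2 : (obl == roi) = false := by simp only [beq_eq_false_iff_ne, ne_eq]; try omega
      have e3 : (not_ == roi) = false := by simp only [beq_eq_false_iff_ne, ne_eq]; try omega
      simp only [List.filter, e1, e2, e3, List.map]
      simp [pvPriorityScan]
      try split_ifs <;> simp_all <;> omega
    · have hM : max (max roi obl) not_ = roi := by omega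
      rw [hM]
      have e1 : (roi == roi) = true := by simp only [beq_iff_eq]; try omega
      have e2 : (obl == roi) = false := by simp only [beq_eq_false_iff_ne, ne_eq]; try omega
      have e3 : (not_ == roi) = false := by simp only [beq_eq_false_iff_ne, ne_eq]; try omega
      simp only [List.filter, e1, e2, e3, List.map]
      simp [pvPriorityScan]
      try split_ifs <;> simp_all <;> omega
    · have hM : max (max roi obl) not_ = roi := by omega
      rw [hM]
      have e1 : (roi == roi) = true := by simp only [beq_iff_eq]; try omega
      have e2 : (obl == roi) = false := by simp only [beq_eq_false_iff_ne, ne_eq]; try omega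
      have e3 : (not_ == roi) = false := by simp only [beq_eq_false_iff_ne, ne_eq]; try omega
      simp only [List.filter, e1, e2, e3, List.map]
      simp [pvPriorityScan]
      try split_ifs <;> simp_all <;> omega
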